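-- pv_equiv track=rewrite | github.com/seyoung755/AlgorithmTest | Programmers/블록 게임.py | bfs
-- ===== SOURCE A (Python) =====
-- from collections import deque
--
-- def bfs(board, r, c, num, visited):
--     N = len(board)
--     q = deque()
--     q.append([r,c])
--     visited[r][c] = True
--     dir = [(0,1), (1,0), (-1,0), (0,-1)]
--
--     minr, maxr = r, r
--     minc, maxc = c, c
--
--     while q:
--         cr, cc = q.popleft()
--         for dr, dc in dir:
--             nr, nc = cr+dr, cc+dc
--             if 0 <= nr < N and 0 <= nc < N and not visited[nr][nc]:
--                 if board[nr][nc] == num: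
--                     q.append([nr,nc])
--                     visited[nr][nc] = True
--                     minr = min(nr, minr)
--                     maxr = max(nr, maxr)
--                     minc = min(nc, minc)
--                     maxc = max(nc, maxc)
--
--     return [(minr, minc), (maxr, maxc)]
-- ===== SOURCE B (Python) =====
-- def bfs(board, r, c, num, visited):
--     # Recursive DFS flood fill: each call marks its cell, folds it into the
--     # running bounds, and recurses into eligible neighbors.  Mutates visited
--     # exactly like A (same component gets marked).
--     N = len(board)
--     bounds = [r, r, c, c]
--
--     def dfs(cr, cc):
--         visited[cr][cc] = True
--         bounds[0] = min(cr, bounds[0])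
--         bounds[1] = max(cr, bounds[1])
--         bounds[2] = min(cc, bounds[2])
--         bounds[3] = max(cc, bounds[3])
--         for nr, nc in ((cr, cc + 1), (cr + 1, cc), (cr - 1, cc), (cr, cc - 1)):
--             if 0 <= nr < N and 0 <= nc < N and not visited[nr][nc] and board[nr][nc] == num:
--                 dfs(nr, nc)
--
--     dfs(r, c)
--     return [(bounds[0], bounds[2]), (bounds[1], bounds[3])]
-- ===== Notes on version B (the rewrite author's own statement) =====
-- stated objective: alternative
-- what changed: Replaces the iterative deque BFS (queue, mark-on-enqueue, bounds updated at discovery) by a recursive depth-first flood fill: an inner dfs helper marks its own cell on entry, folds that cell into the shared bounds, and recurses into eligible neighbors, so there is no queue or worklist at all.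
import Mathlib
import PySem

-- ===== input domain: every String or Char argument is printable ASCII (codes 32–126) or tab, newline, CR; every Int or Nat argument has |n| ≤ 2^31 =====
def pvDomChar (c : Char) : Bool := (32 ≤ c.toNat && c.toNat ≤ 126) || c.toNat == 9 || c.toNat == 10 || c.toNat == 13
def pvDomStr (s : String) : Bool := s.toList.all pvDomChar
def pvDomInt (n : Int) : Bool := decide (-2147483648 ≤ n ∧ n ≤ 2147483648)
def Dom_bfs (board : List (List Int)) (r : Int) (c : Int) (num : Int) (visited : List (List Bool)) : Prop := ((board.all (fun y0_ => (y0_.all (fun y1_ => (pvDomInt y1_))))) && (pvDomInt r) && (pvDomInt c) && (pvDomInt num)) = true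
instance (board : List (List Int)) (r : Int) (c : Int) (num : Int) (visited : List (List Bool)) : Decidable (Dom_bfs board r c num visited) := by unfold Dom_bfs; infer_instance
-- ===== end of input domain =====

-- B replaces A's deque BFS (queue, bounds updated at discovery) by a recursive
-- depth-first flood fill (each call marks its own cell and folds it into the
-- bounds, then recurses into eligible neighbours); equivalence is about the
-- return value (both mutate `visited` identically in Python).

-- ===== PORT A =====
-- Shared grid primitives (indices are applied after the ports' 0 ≤ · guards, so
-- `.toNat` is exact there).  Out-of-structure reads return a default (`true` =
-- "treated as visited", board default 0); Python raises there and Pre_ excludes it.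
def getRowB : List Bool → Nat → Bool
  | [], _ => true
  | b :: _, 0 => b
  | _ :: bs, j + 1 => getRowB bs j

def getVis : List (List Bool) → Nat → Nat → Bool
  | [], _, _ => true
  | row :: _, 0, j => getRowB row j
  | _ :: rs, i + 1, j => getVis rs i j

def setRowB : List Bool → Nat → List Bool
  | [], _ => []
  | _ :: bs, 0 => true :: bs
  | b :: bs, j + 1 => b :: setRowB bs j

def setVis : List (List Bool) → Nat → Nat → List (List Bool)
  | [], _, _ => []
  | row :: rs, 0, j => setRowB row j :: rs
  | row :: rs, i + 1, j => row :: setVis rs i j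

def getRowI : List Int → Nat → Int
  | [], _ => 0
  | x :: _, 0 => x
  | _ :: xs, j + 1 => getRowI xs j

def getBoard : List (List Int) → Nat → Nat → Int
  | [], _, _ => 0
  | row :: _, 0, j => getRowI row j
  | _ :: rs, i + 1, j => getBoard rs i j

-- Python's `visited[x][y] = True`: negative indices wrap (row by len(visited),
-- column by that row's length); out-of-range (Python raises, excluded by Pre_)
-- is a no-op here.  Used verbatim by both ports for every mark.
def getRowOf : List (List Bool) → Nat → List Bool
  | [], _ => []
  | row :: _, 0 => row
  | _ :: rs, i + 1 => getRowOf rs i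

def seedSet (visited : List (List Bool)) (r c : Int) : List (List Bool) :=
  let i : Int := if r < 0 then r + visited.length else r
  let m : Int := (getRowOf visited i.toNat).length
  let j : Int := if c < 0 then c + m else c
  setVis visited i.toNat j.toNat

-- count of unvisited cells: the fuel measure making both loops total
def cfRow : List Bool → Nat
  | [] => 0
  | b :: bs => (if b then 0 else 1) + cfRow bs

def cfv : List (List Bool) → Nat
  | [] => 0
  | row :: rs => cfRow row + cfv rs

def bfsDirs : List (Int × Int) := [(0, 1), (1, 0), (-1, 0), (0, -1)]

-- one direction of A's inner `for dr, dc in dir` loop (accumulator: queue tail, visited, (minr, maxr, minc, maxc))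
def bfsStep (board : List (List Int)) (num N cr cc : Int)
    (acc : List (Int × Int) × List (List Bool) × (Int × Int × Int × Int)) (d : Int × Int) :
    List (Int × Int) × List (List Bool) × (Int × Int × Int × Int) :=
  let nr := cr + d.1
  let nc := cc + d.2
  if 0 ≤ nr ∧ nr < N ∧ 0 ≤ nc ∧ nc < N ∧ getVis acc.2.1 nr.toNat nc.toNat = false then
    if getBoard board nr.toNat nc.toNat = num then
      (acc.1 ++ [(nr, nc)], setVis acc.2.1 nr.toNat nc.toNat,
        (min nr acc.2.2.1, max nr acc.2.2.2.1, min nc acc.2.2.2.2.1, max nc acc.2.2.2.2.2))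
    else acc
  else acc

-- A's `while q` loop; fuel only makes it total (cfv-based fuel is never exhausted)
def bfsLoop (board : List (List Int)) (num N : Int) :
    Nat → List (Int × Int) → List (List Bool) → Int × Int × Int × Int → Int × Int × Int × Int
  | 0, _, _, b => b
  | _ + 1, [], _, b => b
  | f + 1, (cr, cc) :: rest, v, b =>
    let s := bfsDirs.foldl (bfsStep board num N cr cc) (rest, v, b)
    bfsLoop board num N f s.1 s.2.1 s.2.2

def bfs (board : List (List Int)) (r : Int) (c : Int) (num : Int) (visited : List (List Bool)) : List (Int × Int) :=
  let N : Int := board.length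
  let v0 := seedSet visited r c
  let b := bfsLoop board num N (cfv v0 + 1) [(r, c)] v0 (r, r, c, c)
  [(b.1, b.2.2.1), (b.2.1, b.2.2.2)]

-- ===== PORT B =====
-- B's neighbour tuple ((cr,cc+1),(cr+1,cc),(cr-1,cc),(cr,cc-1))
def bfsNbrs (cr cc : Int) : List (Int × Int) := [(cr, cc + 1), (cr + 1, cc), (cr - 1, cc), (cr, cc - 1)]

-- one neighbour of B's `for nr, nc in …` loop: recurse when in-bounds, unvisited, equal to num
def dfsStep (board : List (List Int)) (num N : Int)
    (go : Int → Int → List (List Bool) × (Int × Int × Int × Int) → List (List Bool) × (Int × Int × Int × Int))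
    (s : List (List Bool) × (Int × Int × Int × Int)) (q : Int × Int) :
    List (List Bool) × (Int × Int × Int × Int) :=
  if 0 ≤ q.1 ∧ q.1 < N ∧ 0 ≤ q.2 ∧ q.2 < N ∧ getVis s.1 q.1.toNat q.2.toNat = false ∧
      getBoard board q.1.toNat q.2.toNat = num then
    go q.1 q.2 s
  else s

-- B's recursive `dfs`: mark the cell, fold it into the bounds, recurse into the
-- four neighbours; fuel only makes it total (cfv-based fuel is never exhausted)
def dfsGo (board : List (List Int)) (num N : Int) :
    Nat → Int → Int → List (List Bool) × (Int × Int × Int × Int) →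
    List (List Bool) × (Int × Int × Int × Int)
  | 0, _, _, s => s
  | f + 1, cr, cc, (v, b) =>
    (bfsNbrs cr cc).foldl (dfsStep board num N (dfsGo board num N f))
      (seedSet v cr cc, (min cr b.1, max cr b.2.1, min cc b.2.2.1, max cc b.2.2.2))

def bfs_alt (board : List (List Int)) (r : Int) (c : Int) (num : Int) (visited : List (List Bool)) : List (Int × Int) :=
  let N : Int := board.length
  let s := dfsGo board num N (cfv visited + 2) r c (visited, (r, r, c, c))
  [(s.2.1, s.2.2.2.1), (s.2.2.1, s.2.2.2.2)]

-- ===== PRECONDITION & SPEC =====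
-- Pre_ = exactly the closed-form raise-free domain we claim: the seed indexing
-- visited[r][c] is valid (Python wrap included), and either all four seed
-- neighbours are outside the N×N area (the loop then touches nothing) or the
-- N×N prefix of board and visited is fully present (every access in range).
-- Inputs excluded while A still returns are ragged grids a lucky traversal
-- happens to avoid — not expressible in closed form.
def Pre_bfs (board : List (List Int)) (r : Int) (c : Int) (num : Int) (visited : List (List Bool)) : Prop :=
  let N : Int := board.length
  let vl : Int := visited.length
  let i : Int := if r < 0 then r + vl else r
  let rl : Int := (visited.getD i.toNat []).length
  (-vl ≤ r ∧ r < vl) ∧ (-rl ≤ c ∧ c < rl) ∧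
  ((¬(0 ≤ r ∧ r < N ∧ 0 ≤ c + 1 ∧ c + 1 < N) ∧
    ¬(0 ≤ r + 1 ∧ r + 1 < N ∧ 0 ≤ c ∧ c < N) ∧
    ¬(0 ≤ r - 1 ∧ r - 1 < N ∧ 0 ≤ c ∧ c < N) ∧
    ¬(0 ≤ r ∧ r < N ∧ 0 ≤ c - 1 ∧ c - 1 < N)) ∨
   (N ≤ vl ∧ ∀ k ∈ List.range board.length,
      N ≤ ((visited.getD k []).length : Int) ∧ N ≤ ((board.getD k []).length : Int)))
instance (board : List (List Int)) (r : Int) (c : Int) (num : Int) (visited : List (List Bool)) : Decidable (Pre_bfs board r c num visited) := by unfold Pre_bfs; infer_instance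

def pvWitness_bfs : List (List Int) × Int × Int × Int × List (List Bool) :=
  ([[1, 1], [1, 2]], 0, 0, 1, [[false, false], [false, false]])

def Spec_bfs (board : List (List Int)) (r : Int) (c : Int) (num : Int) (visited : List (List Bool)) (out : List (Int × Int)) : Prop := out = bfs_alt board r c num visited
instance (board : List (List Int)) (r : Int) (c : Int) (num : Int) (visited : List (List Bool)) (out : List (Int × Int)) : Decidable (Spec_bfs board r c num visited out) := by unfold Spec_bfs; infer_instance

-- ===== CLAIM (what is proved, stated in full; the proofs are below) =====
def Claim_equal_bfs : Prop := ∀ (board : List (List Int)) (r : Int) (c : Int) (num : Int) (visited : List (List Bool)), Dom_bfs board r c num visited → Pre_bfs board r c num visited → Spec_bfs board r c num visited (bfs board r c num visited)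

-- ===== LEMMAS AND PROOFS =====

-- abstract view used by the proofs only: visited lookup at an Int pair,
-- the "in range and equal to num" guard, monotone-marking, local closure
def visP (v : List (List Bool)) (p : Int × Int) : Bool := getVis v p.1.toNat p.2.toNat

def inRnum (board : List (List Int)) (N num : Int) (p : Int × Int) : Prop :=
  0 ≤ p.1 ∧ p.1 < N ∧ 0 ≤ p.2 ∧ p.2 < N ∧ getBoard board p.1.toNat p.2.toNat = num

def mono0 (v0 v : List (List Bool)) : Prop :=
  ∀ p : Int × Int, 0 ≤ p.1 → 0 ≤ p.2 → visP v0 p = true → visP v p = true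

def closedAt (board : List (List Int)) (N num : Int) (v : List (List Bool)) (p : Int × Int) : Prop :=
  ∀ q ∈ bfsNbrs p.1 p.2, inRnum board N num q → visP v q = true

-- cells both runs can discover: reachable from the seed through in-range,
-- num-valued cells unvisited in the seeded grid v0
inductive Reach (board : List (List Int)) (N num : Int) (v0 : List (List Bool)) (r c : Int) : Int × Int → Prop
  | seed : Reach board N num v0 r c (r, c)
  | step {p q : Int × Int} : Reach board N num v0 r c p → q ∈ bfsNbrs p.1 p.2 →
      inRnum board N num q → visP v0 q = false → Reach board N num v0 r c q

-- reference scan: what processing a list of candidate neighbour positions does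
-- to the visited grid, and which cells it discovers (A's inner loop equals it)
def pvScan (board : List (List Int)) (num N : Int) :
    List (Int × Int) → List (List Bool) → List (Int × Int) × List (List Bool)
  | [], v => ([], v)
  | p :: ps, v =>
    if 0 ≤ p.1 ∧ p.1 < N ∧ 0 ≤ p.2 ∧ p.2 < N ∧ getVis v p.1.toNat p.2.toNat = false ∧
        getBoard board p.1.toNat p.2.toNat = num then
      let s := pvScan board num N ps (setVis v p.1.toNat p.2.toNat)
      (p :: s.1, s.2)
    else pvScan board num N ps v

-- the running-bounds update replayed over a list of discovered cells
def pvQuad (b : Int × Int × Int × Int) (cs : List (Int × Int)) : Int × Int × Int × Int :=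
  cs.foldl (fun b p => (min p.1 b.1, max p.1 b.2.1, min p.2 b.2.2.1, max p.2 b.2.2.2)) b

theorem getRowB_setRowB (row : List Bool) (j j' : Nat) :
    getRowB (setRowB row j) j' = if j' = j then true else getRowB row j' := by
  induction row generalizing j j' with
  | nil => simp only [setRowB]; split <;> simp [getRowB]
  | cons b bs ih =>
    cases j with
    | zero =>
      cases j' with
      | zero => simp [setRowB, getRowB]
      | succ j' => simp [setRowB, getRowB]
    | succ j =>
      cases j' with
      | zero => simp [setRowB, getRowB]
      | succ j' => simpa [setRowB, getRowB, Nat.succ_inj] using ih j j'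

theorem getVis_setVis (v : List (List Bool)) (i j i' j' : Nat) :
    getVis (setVis v i j) i' j' = if i' = i ∧ j' = j then true else getVis v i' j' := by
  induction v generalizing i i' with
  | nil => simp only [setVis]; split <;> simp [getVis]
  | cons row rs ih =>
    cases i with
    | zero =>
      cases i' with
      | zero => simp [setVis, getVis, getRowB_setRowB]
      | succ i' => simp [setVis, getVis]
    | succ i =>
      cases i' with
      | zero => simp [setVis, getVis]
      | succ i' => simpa [setVis, getVis, Nat.succ_inj] using ih i i'

theorem cfRow_set {row : List Bool} {j : Nat} (h : getRowB row j = false) :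
    cfRow (setRowB row j) + 1 = cfRow row := by
  induction row generalizing j with
  | nil => simp [getRowB] at h
  | cons b bs ih =>
    cases j with
    | zero =>
      simp [getRowB] at h
      simp [setRowB, cfRow, h]
      omega
    | succ j =>
      simp only [getRowB] at h
      simp only [setRowB, cfRow]
      have := ih h
      omega

theorem cfv_set {v : List (List Bool)} {i j : Nat} (h : getVis v i j = false) :
    cfv (setVis v i j) + 1 = cfv v := by
  induction v generalizing i with
  | nil => simp [getVis] at h
  | cons row rs ih =>
    cases i with
    | zero =>
      simp only [getVis] at h
      simp only [setVis, cfv]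
      have := cfRow_set h
      omega
    | succ i =>
      simp only [getVis] at h
      simp only [setVis, cfv]
      have := ih h
      omega

theorem cfRow_set_le (row : List Bool) (j : Nat) : cfRow (setRowB row j) ≤ cfRow row := by
  induction row generalizing j with
  | nil => simp [setRowB]
  | cons b bs ih =>
    cases j with
    | zero => cases b <;> simp [setRowB, cfRow]
    | succ j => simp only [setRowB, cfRow]; have := ih j; omega

theorem cfv_setVis_le (v : List (List Bool)) (i j : Nat) : cfv (setVis v i j) ≤ cfv v := by
  induction v generalizing i with
  | nil => simp [setVis]
  | cons row rs ih =>
    cases i with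
    | zero => simp only [setVis, cfv]; have := cfRow_set_le row j; omega
    | succ i => simp only [setVis, cfv]; have := ih i; omega

theorem cfv_seedSet_le (v : List (List Bool)) (r c : Int) : cfv (seedSet v r c) ≤ cfv v := by
  unfold seedSet
  exact cfv_setVis_le _ _ _

theorem seedSet_nonneg (v : List (List Bool)) (r c : Int) (hr : 0 ≤ r) (hc : 0 ≤ c) :
    seedSet v r c = setVis v r.toNat c.toNat := by
  unfold seedSet
  simp [not_lt.mpr hr, not_lt.mpr hc]

theorem visP_setVis_self (v : List (List Bool)) (p : Int × Int) :
    visP (setVis v p.1.toNat p.2.toNat) p = true := by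
  unfold visP
  rw [getVis_setVis]
  simp

theorem visP_setVis (v : List (List Bool)) (p q : Int × Int) (hp1 : 0 ≤ p.1) (hp2 : 0 ≤ p.2)
    (hq1 : 0 ≤ q.1) (hq2 : 0 ≤ q.2) :
    visP (setVis v p.1.toNat p.2.toNat) q = true ↔ visP v q = true ∨ q = p := by
  unfold visP
  rw [getVis_setVis]
  constructor
  · intro h
    split at h
    · rename_i hc
      right
      have : q.1 = p.1 := by omega
      have : q.2 = p.2 := by omega
      exact Prod.ext (by omega) (by omega)
    · exact Or.inl h
  · intro h
    rcases h with h | h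
    · split
      · rfl
      · exact h
    · subst h; simp

theorem pvScan_cf (board : List (List Int)) (num N : Int) :
    ∀ (ps : List (Int × Int)) (v : List (List Bool)),
      cfv (pvScan board num N ps v).2 + (pvScan board num N ps v).1.length = cfv v := by
  intro ps
  induction ps with
  | nil => intro v; simp [pvScan]
  | cons p ps ih =>
    intro v
    by_cases hg : 0 ≤ p.1 ∧ p.1 < N ∧ 0 ≤ p.2 ∧ p.2 < N ∧ getVis v p.1.toNat p.2.toNat = false ∧
        getBoard board p.1.toNat p.2.toNat = num
    · simp only [pvScan, if_pos hg, List.length_cons]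
      have h1 := cfv_set (v := v) (i := p.1.toNat) (j := p.2.toNat) hg.2.2.2.2.1
      have h2 := ih (setVis v p.1.toNat p.2.toNat)
      omega
    · simp only [pvScan, if_neg hg]
      exact ih v

theorem pvScan_char (board : List (List Int)) (num N : Int) :
    ∀ (ps : List (Int × Int)) (v : List (List Bool)) (p : Int × Int), 0 ≤ p.1 → 0 ≤ p.2 →
      (visP (pvScan board num N ps v).2 p = true ↔
        visP v p = true ∨ p ∈ (pvScan board num N ps v).1) := by
  intro ps
  induction ps with
  | nil => intro v p h1 h2; simp [pvScan]
  | cons q ps ih =>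
    intro v p h1 h2
    by_cases hg : 0 ≤ q.1 ∧ q.1 < N ∧ 0 ≤ q.2 ∧ q.2 < N ∧ getVis v q.1.toNat q.2.toNat = false ∧
        getBoard board q.1.toNat q.2.toNat = num
    · simp only [pvScan, if_pos hg]
      rw [ih (setVis v q.1.toNat q.2.toNat) p h1 h2]
      rw [visP_setVis v q p hg.1 hg.2.2.1 h1 h2]
      simp only [List.mem_cons]
      tauto
    · simp only [pvScan, if_neg hg]
      exact ih v p h1 h2

theorem pvScan_sound (board : List (List Int)) (num N : Int) :
    ∀ (ps : List (Int × Int)) (v : List (List Bool)) (q : Int × Int),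
      q ∈ (pvScan board num N ps v).1 →
      q ∈ ps ∧ inRnum board N num q ∧ visP v q = false := by
  intro ps
  induction ps with
  | nil => intro v q h; simp [pvScan] at h
  | cons q0 ps ih =>
    intro v q h
    by_cases hg : 0 ≤ q0.1 ∧ q0.1 < N ∧ 0 ≤ q0.2 ∧ q0.2 < N ∧ getVis v q0.1.toNat q0.2.toNat = false ∧
        getBoard board q0.1.toNat q0.2.toNat = num
    · simp only [pvScan, if_pos hg, List.mem_cons] at h
      rcases h with h | h
      · subst h
        exact ⟨List.mem_cons_self, ⟨hg.1, hg.2.1, hg.2.2.1, hg.2.2.2.1, hg.2.2.2.2.2⟩,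
          hg.2.2.2.2.1⟩
      · obtain ⟨hm, hin, hv⟩ := ih (setVis v q0.1.toNat q0.2.toNat) q h
        refine ⟨List.mem_cons_of_mem _ hm, hin, ?_⟩
        unfold visP at hv ⊢
        rw [getVis_setVis] at hv
        split at hv
        · exact absurd hv (by simp)
        · exact hv
    · simp only [pvScan, if_neg hg] at h
      obtain ⟨hm, hin, hv⟩ := ih v q h
      exact ⟨List.mem_cons_of_mem _ hm, hin, hv⟩

theorem pvScan_closed (board : List (List Int)) (num N : Int) :
    ∀ (ps : List (Int × Int)) (v : List (List Bool)) (q : Int × Int),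
      q ∈ ps → inRnum board N num q → visP (pvScan board num N ps v).2 q = true := by
  intro ps
  induction ps with
  | nil => intro v q h; simp at h
  | cons q0 ps ih =>
    intro v q h hin
    by_cases hg : 0 ≤ q0.1 ∧ q0.1 < N ∧ 0 ≤ q0.2 ∧ q0.2 < N ∧ getVis v q0.1.toNat q0.2.toNat = false ∧
        getBoard board q0.1.toNat q0.2.toNat = num
    · simp only [pvScan, if_pos hg]
      rcases List.mem_cons.mp h with h | h
      · subst h
        have := pvScan_char board num N ps (setVis v q.1.toNat q.2.toNat) q hin.1 hin.2.2.1
        rw [this]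
        exact Or.inl (visP_setVis_self v q)
      · exact ih (setVis v q0.1.toNat q0.2.toNat) q h hin
    · simp only [pvScan, if_neg hg]
      rcases List.mem_cons.mp h with h | h
      · subst h
        have hv : visP v q = true := by
          unfold visP
          rcases hin with ⟨a1, a2, a3, a4, a5⟩
          by_contra hb
          exact hg ⟨a1, a2, a3, a4, by simpa using hb, a5⟩
        rw [pvScan_char board num N ps v q hin.1 hin.2.2.1]
        exact Or.inl hv
      · exact ih v q h hin

theorem foldA_eq (board : List (List Int)) (num N cr cc : Int) :
    ∀ (ds : List (Int × Int)) (q : List (Int × Int)) (v : List (List Bool)) (b : Int × Int × Int × Int),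
      ds.foldl (bfsStep board num N cr cc) (q, v, b) =
        ((q ++ (pvScan board num N (ds.map (fun d => (cr + d.1, cc + d.2))) v).1,
          (pvScan board num N (ds.map (fun d => (cr + d.1, cc + d.2))) v).2,
          pvQuad b (pvScan board num N (ds.map (fun d => (cr + d.1, cc + d.2))) v).1)) := by
  intro ds
  induction ds with
  | nil => intro q v b; simp [pvScan, pvQuad]
  | cons d ds ih =>
    intro q v b
    by_cases hg : 0 ≤ cr + d.1 ∧ cr + d.1 < N ∧ 0 ≤ cc + d.2 ∧ cc + d.2 < N ∧
        getVis v (cr + d.1).toNat (cc + d.2).toNat = false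
    · by_cases hb : getBoard board (cr + d.1).toNat (cc + d.2).toNat = num
      · have hcomb : 0 ≤ cr + d.1 ∧ cr + d.1 < N ∧ 0 ≤ cc + d.2 ∧ cc + d.2 < N ∧
            getVis v (cr + d.1).toNat (cc + d.2).toNat = false ∧
            getBoard board (cr + d.1).toNat (cc + d.2).toNat = num :=
          ⟨hg.1, hg.2.1, hg.2.2.1, hg.2.2.2.1, hg.2.2.2.2, hb⟩
        simp only [List.foldl_cons, List.map_cons, bfsStep, if_pos hg, if_pos hb]
        rw [ih]
        simp only [pvScan, if_pos hcomb, pvQuad, List.foldl_cons, List.append_assoc,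
          List.singleton_append]
      · have hcomb : ¬(0 ≤ cr + d.1 ∧ cr + d.1 < N ∧ 0 ≤ cc + d.2 ∧ cc + d.2 < N ∧
            getVis v (cr + d.1).toNat (cc + d.2).toNat = false ∧
            getBoard board (cr + d.1).toNat (cc + d.2).toNat = num) := by
          intro hc; exact hb hc.2.2.2.2.2
        simp only [List.foldl_cons, List.map_cons, bfsStep, if_pos hg, if_neg hb]
        rw [ih]
        simp only [pvScan, if_neg hcomb]
    · have hcomb : ¬(0 ≤ cr + d.1 ∧ cr + d.1 < N ∧ 0 ≤ cc + d.2 ∧ cc + d.2 < N ∧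
          getVis v (cr + d.1).toNat (cc + d.2).toNat = false ∧
          getBoard board (cr + d.1).toNat (cc + d.2).toNat = num) := by
        intro hc; exact hg ⟨hc.1, hc.2.1, hc.2.2.1, hc.2.2.2.1, hc.2.2.2.2.1⟩
      simp only [List.foldl_cons, List.map_cons, bfsStep, if_neg hg]
      rw [ih]
      simp only [pvScan, if_neg hcomb]

theorem bfsNbrs_eq_map (cr cc : Int) :
    bfsNbrs cr cc = bfsDirs.map (fun d => (cr + d.1, cc + d.2)) := by
  simp [bfsNbrs, bfsDirs, sub_eq_add_neg]

theorem pvQuad_append (b : Int × Int × Int × Int) (l1 l2 : List (Int × Int)) :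
    pvQuad b (l1 ++ l2) = pvQuad (pvQuad b l1) l2 := by
  simp [pvQuad, List.foldl_append]

theorem pvQuad_eq_folds :
    ∀ (cs : List (Int × Int)) (b : Int × Int × Int × Int),
      pvQuad b cs = ((cs.map Prod.fst).foldl min b.1, (cs.map Prod.fst).foldl max b.2.1,
        (cs.map Prod.snd).foldl min b.2.2.1, (cs.map Prod.snd).foldl max b.2.2.2) := by
  intro cs
  induction cs with
  | nil => intro b; simp [pvQuad]
  | cons p ps ih =>
    intro b
    simp only [pvQuad, List.foldl_cons, List.map_cons] at *
    rw [ih]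
    simp [min_comm, max_comm]

theorem foldl_min_congr (l1 l2 : List Int) (a : Int) (h : ∀ x, x ∈ l1 ↔ x ∈ l2) :
    l1.foldl min a = l2.foldl min a := by
  apply le_antisymm
  · rcases PySem.List.foldl_min_mem l2 a with h2 | h2
    · rw [h2]; exact (PySem.List.foldl_min_le l1 a).1
    · exact (PySem.List.foldl_min_le l1 a).2 _ ((h _).mpr h2)
  · rcases PySem.List.foldl_min_mem l1 a with h1 | h1
    · rw [h1]; exact (PySem.List.foldl_min_le l2 a).1
    · exact (PySem.List.foldl_min_le l2 a).2 _ ((h _).mp h1)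

theorem foldl_max_congr (l1 l2 : List Int) (a : Int) (h : ∀ x, x ∈ l1 ↔ x ∈ l2) :
    l1.foldl max a = l2.foldl max a := by
  apply le_antisymm
  · rcases PySem.List.foldl_max_mem l1 a with h1 | h1
    · rw [h1]; exact (PySem.List.le_foldl_max l2 a).1
    · exact (PySem.List.le_foldl_max l2 a).2 _ ((h _).mp h1)
  · rcases PySem.List.foldl_max_mem l2 a with h2 | h2
    · rw [h2]; exact (PySem.List.le_foldl_max l1 a).1
    · exact (PySem.List.le_foldl_max l1 a).2 _ ((h _).mpr h2)

theorem pvQuad_congr (b : Int × Int × Int × Int) (l1 l2 : List (Int × Int))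
    (h : ∀ x, x ∈ l1 ↔ x ∈ l2) : pvQuad b l1 = pvQuad b l2 := by
  rw [pvQuad_eq_folds, pvQuad_eq_folds]
  have hf : ∀ x : Int, x ∈ l1.map Prod.fst ↔ x ∈ l2.map Prod.fst := by
    intro x; simp only [List.mem_map]
    exact ⟨fun ⟨p, hp, he⟩ => ⟨p, (h p).mp hp, he⟩, fun ⟨p, hp, he⟩ => ⟨p, (h p).mpr hp, he⟩⟩
  have hs : ∀ x : Int, x ∈ l1.map Prod.snd ↔ x ∈ l2.map Prod.snd := by
    intro x; simp only [List.mem_map]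
    exact ⟨fun ⟨p, hp, he⟩ => ⟨p, (h p).mp hp, he⟩, fun ⟨p, hp, he⟩ => ⟨p, (h p).mpr hp, he⟩⟩
  rw [foldl_min_congr _ _ _ hf, foldl_max_congr _ _ _ hf,
    foldl_min_congr _ _ _ hs, foldl_max_congr _ _ _ hs]

theorem reach_cases {board : List (List Int)} {N num : Int} {v0 : List (List Bool)} {r c : Int}
    {x : Int × Int} (h : Reach board N num v0 r c x) :
    x = (r, c) ∨ (inRnum board N num x ∧ visP v0 x = false) := by
  cases h with
  | seed => exact Or.inl rfl
  | step _ _ h1 h2 => exact Or.inr ⟨h1, h2⟩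

theorem visP_seed_self (v : List (List Bool)) (r c : Int) (hr : 0 ≤ r) (hc : 0 ≤ c) :
    visP (seedSet v r c) (r, c) = true := by
  rw [seedSet_nonneg v r c hr hc]
  exact visP_setVis_self v (r, c)

theorem good0_ne_seed {board : List (List Int)} {N num : Int} {visited : List (List Bool)}
    {r c : Int} {p : Int × Int} (h1 : inRnum board N num p)
    (h2 : visP (seedSet visited r c) p = false) : p ≠ (r, c) := by
  intro he
  rw [he] at h2 h1
  rw [visP_seed_self visited r c h1.1 h1.2.2.1] at h2
  exact Bool.true_eq_false.mp h2

-- A's whole loop: it discovers exactly a list D of reachable cells, the bounds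
-- are the quad-fold over D, and at the end every reachable cell is closed or untouched
theorem runA (board : List (List Int)) (N num : Int) (v0 : List (List Bool)) (r c : Int) :
    ∀ (f : Nat) (Q : List (Int × Int)) (v : List (List Bool)) (b : Int × Int × Int × Int),
      Q.length + cfv v ≤ f →
      mono0 v0 v →
      (∀ p ∈ Q, Reach board N num v0 r c p) →
      (∀ p, Reach board N num v0 r c p →
        p ∈ Q ∨ closedAt board N num v p ∨ (p ≠ (r, c) ∧ visP v p = false)) →
      ∃ D vf,
        bfsLoop board num N f Q v b = pvQuad b D ∧
        (∀ p : Int × Int, 0 ≤ p.1 → 0 ≤ p.2 → (visP vf p = true ↔ visP v p = true ∨ p ∈ D)) ∧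
        (∀ q ∈ D, Reach board N num v0 r c q ∧ inRnum board N num q ∧ visP v0 q = false) ∧
        (∀ p, Reach board N num v0 r c p →
          closedAt board N num vf p ∨ (p ≠ (r, c) ∧ visP vf p = false)) := by
  intro f
  induction f with
  | zero =>
    intro Q v b hf hm0 hQ hJ
    have hQ0 : Q = [] := by
      cases Q with
      | nil => rfl
      | cons a l => simp [List.length_cons] at hf
    subst hQ0
    refine ⟨[], v, by simp [bfsLoop, pvQuad], by intro p _ _; simp, by simp, ?_⟩
    intro p hp
    rcases hJ p hp with h | h | h
    · simp at h
    · exact Or.inl h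
    · exact Or.inr h
  | succ f ih =>
    intro Q v b hf hm0 hQ hJ
    cases Q with
    | nil =>
      refine ⟨[], v, by simp [bfsLoop, pvQuad], by intro p _ _; simp, by simp, ?_⟩
      intro p hp
      rcases hJ p hp with h | h | h
      · simp at h
      · exact Or.inl h
      · exact Or.inr h
    | cons hd rest =>
      obtain ⟨cr, cc⟩ := hd
      have key := foldA_eq board num N cr cc bfsDirs rest v b
      have hnb : bfsNbrs cr cc = bfsDirs.map (fun d => (cr + d.1, cc + d.2)) :=
        bfsNbrs_eq_map cr cc
      set ps := bfsDirs.map (fun d => (cr + d.1, cc + d.2)) with hps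
      set news := (pvScan board num N ps v).1 with hnews
      set v' := (pvScan board num N ps v).2 with hv'
      have hstep : bfsLoop board num N (f + 1) ((cr, cc) :: rest) v b =
          bfsLoop board num N f (rest ++ news) v' (pvQuad b news) := by
        simp only [bfsLoop]
        rw [key]
      have Schar := fun (p : Int × Int) (h1 : 0 ≤ p.1) (h2 : 0 ≤ p.2) =>
        pvScan_char board num N ps v p h1 h2
      have Ssound := fun (q : Int × Int) (h : q ∈ news) => pvScan_sound board num N ps v q h
      have Sclosed := fun (q : Int × Int) (h : q ∈ ps) => pvScan_closed board num N ps v q h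
      have Scf := pvScan_cf board num N ps v
      have hnewsR : ∀ q ∈ news, Reach board N num v0 r c q ∧ inRnum board N num q ∧
          visP v0 q = false := by
        intro q hq
        obtain ⟨hmem, hin, hvq⟩ := Ssound q hq
        have hq0 : visP v0 q = false := by
          by_contra hb
          have : visP v q = true := hm0 q hin.1 hin.2.2.1 (by simpa using hb)
          rw [this] at hvq; exact absurd hvq (by simp)
        refine ⟨?_, hin, hq0⟩
        exact Reach.step (hQ (cr, cc) List.mem_cons_self) (by rw [hnb]; exact hmem) hin hq0
      obtain ⟨D2, vf, hres, hchar, hc3, hjend⟩ :=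
        ih (rest ++ news) v' (pvQuad b news)
          (by
            have Scf2 := Scf
            rw [← hv', ← hnews] at Scf2
            simp only [List.length_append]
            simp only [List.length_cons] at hf
            omega)
          (by
            intro p h1 h2 hp
            exact (Schar p h1 h2).mpr (Or.inl (hm0 p h1 h2 hp)))
          (by
            intro p hp
            rcases List.mem_append.mp hp with h | h
            · exact hQ p (List.mem_cons_of_mem _ h)
            · exact (hnewsR p h).1)
          (by
            intro p hp
            rcases hJ p hp with h | h | h
            · rcases List.mem_cons.mp h with h | h
              · subst h
                right; left
                intro q hq hqin
                rw [hnb] at hq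
                exact Sclosed q hq hqin
              · exact Or.inl (List.mem_append.mpr (Or.inl h))
            · right; left
              intro q hq hqin
              exact (Schar q hqin.1 hqin.2.2.1).mpr (Or.inl (h q hq hqin))
            · rcases reach_cases hp with he | ⟨hin, _⟩
              · exact absurd he h.1
              · by_cases hn : p ∈ news
                · exact Or.inl (List.mem_append.mpr (Or.inr hn))
                · right; right
                  refine ⟨h.1, ?_⟩
                  by_contra hb
                  have := (Schar p hin.1 hin.2.2.1).mp (by simpa using hb)
                  rcases this with hvis | hmem
                  · rw [h.2] at hvis; exact absurd hvis (by simp)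
                  · exact hn hmem)
      refine ⟨news ++ D2, vf, ?_, ?_, ?_, hjend⟩
      · rw [hstep, hres, pvQuad_append]
      · intro p h1 h2
        rw [hchar p h1 h2, Schar p h1 h2]
        simp only [List.mem_append]
        tauto
      · intro q hq
        rcases List.mem_append.mp hq with h | h
        · exact hnewsR q h
        · exact hc3 q h

-- B's inner `for` loop over a candidate list, assuming the single-cell spec at fuel f
theorem runBList (board : List (List Int)) (N num : Int) (v0 : List (List Bool)) (r c : Int) (f : Nat)
    (ih : ∀ (cr cc : Int) (v : List (List Bool)) (b : Int × Int × Int × Int),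
      cfv v < f → inRnum board N num (cr, cc) → visP v (cr, cc) = false → mono0 v0 v →
      Reach board N num v0 r c (cr, cc) →
      ∃ D vf, dfsGo board num N f cr cc (v, b) = (vf, pvQuad b ((cr, cc) :: D)) ∧
        (∀ p : Int × Int, 0 ≤ p.1 → 0 ≤ p.2 →
          (visP vf p = true ↔ visP v p = true ∨ p ∈ (cr, cc) :: D)) ∧
        (∀ q ∈ (cr, cc) :: D, Reach board N num v0 r c q ∧ inRnum board N num q ∧ visP v0 q = false) ∧
        (∀ q ∈ (cr, cc) :: D, closedAt board N num vf q) ∧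
        cfv vf + ((cr, cc) :: D).length = cfv v) :
    ∀ (ps : List (Int × Int)) (v : List (List Bool)) (b : Int × Int × Int × Int),
      cfv v < f →
      (∀ q ∈ ps, ∃ p, Reach board N num v0 r c p ∧ q ∈ bfsNbrs p.1 p.2) →
      mono0 v0 v →
      ∃ D vf,
        ps.foldl (dfsStep board num N (dfsGo board num N f)) (v, b) = (vf, pvQuad b D) ∧
        (∀ p : Int × Int, 0 ≤ p.1 → 0 ≤ p.2 → (visP vf p = true ↔ visP v p = true ∨ p ∈ D)) ∧
        (∀ q ∈ D, Reach board N num v0 r c q ∧ inRnum board N num q ∧ visP v0 q = false) ∧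
        (∀ q ∈ D, closedAt board N num vf q) ∧
        (∀ q ∈ ps, inRnum board N num q → visP vf q = true) ∧
        cfv vf + D.length = cfv v := by
  intro ps
  induction ps with
  | nil =>
    intro v b hf hps hm0
    exact ⟨[], v, by simp [pvQuad], by intro p _ _; simp, by simp, by simp, by simp, by simp⟩
  | cons q ps ihl =>
    intro v b hf hps hm0
    by_cases hg : 0 ≤ q.1 ∧ q.1 < N ∧ 0 ≤ q.2 ∧ q.2 < N ∧ getVis v q.1.toNat q.2.toNat = false ∧
        getBoard board q.1.toNat q.2.toNat = num
    · have hin : inRnum board N num q := ⟨hg.1, hg.2.1, hg.2.2.1, hg.2.2.2.1, hg.2.2.2.2.2⟩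
      have hvq : visP v q = false := hg.2.2.2.2.1
      have hv0q : visP v0 q = false := by
        by_contra hb
        have := hm0 q hin.1 hin.2.2.1 (by simpa using hb)
        rw [this] at hvq; exact absurd hvq (by simp)
      obtain ⟨p0, hRp, hmem⟩ := hps q List.mem_cons_self
      have hRq : Reach board N num v0 r c q := Reach.step hRp hmem hin hv0q
      obtain ⟨D1, vf1, he1, hch1, hr1, hcl1, hcf1⟩ := ih q.1 q.2 v b hf hin hvq hm0 hRq
      obtain ⟨D2, vf, he2, hch2, hr2, hcl2, hcand2, hcf2⟩ :=
        ihl vf1 (pvQuad b (q :: D1))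
          (by simp only [List.length_cons] at hcf1; omega)
          (fun q' hq' => hps q' (List.mem_cons_of_mem _ hq'))
          (by
            intro p h1 h2 hp
            exact (hch1 p h1 h2).mpr (Or.inl (hm0 p h1 h2 hp)))
      have hmono12 : ∀ p : Int × Int, 0 ≤ p.1 → 0 ≤ p.2 → visP vf1 p = true → visP vf p = true :=
        fun p h1 h2 hp => (hch2 p h1 h2).mpr (Or.inl hp)
      refine ⟨(q :: D1) ++ D2, vf, ?_, ?_, ?_, ?_, ?_, ?_⟩
      · rw [List.foldl_cons]
        show List.foldl _ (dfsStep board num N (dfsGo board num N f) (v, b) q) ps = _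
        rw [dfsStep, if_pos hg, he1, he2, pvQuad_append]
      · intro p h1 h2
        rw [hch2 p h1 h2, hch1 p h1 h2]
        simp only [List.mem_append]
        tauto
      · intro q' hq'
        rcases List.mem_append.mp hq' with h | h
        · exact hr1 q' h
        · exact hr2 q' h
      · intro q' hq'
        rcases List.mem_append.mp hq' with h | h
        · intro t ht htin
          exact hmono12 t htin.1 htin.2.2.1 (hcl1 q' h t ht htin)
        · exact hcl2 q' h
      · intro q' hq' hin'
        rcases List.mem_cons.mp hq' with h | h
        · subst h
          exact hmono12 q' hin'.1 hin'.2.2.1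
            ((hch1 q' hin'.1 hin'.2.2.1).mpr (Or.inr List.mem_cons_self))
        · exact hcand2 q' h hin'
      · simp only [List.length_append, List.length_cons] at *
        omega
    · obtain ⟨D2, vf, he2, hch2, hr2, hcl2, hcand2, hcf2⟩ :=
        ihl v b hf (fun q' hq' => hps q' (List.mem_cons_of_mem _ hq')) hm0
      refine ⟨D2, vf, ?_, hch2, hr2, hcl2, ?_, hcf2⟩
      · rw [List.foldl_cons]
        show List.foldl _ (dfsStep board num N (dfsGo board num N f) (v, b) q) ps = _
        rw [dfsStep, if_neg hg]
        exact he2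
      · intro q' hq' hin'
        rcases List.mem_cons.mp hq' with h | h
        · subst h
          have hv : visP v q' = true := by
            unfold visP
            rcases hin' with ⟨a1, a2, a3, a4, a5⟩
            by_contra hb
            exact hg ⟨a1, a2, a3, a4, by simpa using hb, a5⟩
          exact (hch2 q' hin'.1 hin'.2.2.1).mpr (Or.inl hv)
        · exact hcand2 q' h hin'

-- B's recursive dfs: called on an unvisited in-range reachable cell it discovers
-- that cell plus a list D of further reachable cells, the bounds are the quad-fold,
-- every discovered cell ends closed, and cfv drops by exactly the discovery count
theorem runB (board : List (List Int)) (N num : Int) (v0 : List (List Bool)) (r c : Int) :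
    ∀ (f : Nat) (cr cc : Int) (v : List (List Bool)) (b : Int × Int × Int × Int),
      cfv v < f →
      inRnum board N num (cr, cc) →
      visP v (cr, cc) = false →
      mono0 v0 v →
      Reach board N num v0 r c (cr, cc) →
      ∃ D vf,
        dfsGo board num N f cr cc (v, b) = (vf, pvQuad b ((cr, cc) :: D)) ∧
        (∀ p : Int × Int, 0 ≤ p.1 → 0 ≤ p.2 →
          (visP vf p = true ↔ visP v p = true ∨ p ∈ (cr, cc) :: D)) ∧
        (∀ q ∈ (cr, cc) :: D, Reach board N num v0 r c q ∧ inRnum board N num q ∧ visP v0 q = false) ∧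
        (∀ q ∈ (cr, cc) :: D, closedAt board N num vf q) ∧
        cfv vf + ((cr, cc) :: D).length = cfv v := by
  intro f
  induction f with
  | zero =>
    intro cr cc v b hf
    exact absurd hf (Nat.not_lt_zero _)
  | succ f ih =>
    intro cr cc v b hf hin hvq hm0 hR
    have hseed : seedSet v cr cc = setVis v cr.toNat cc.toNat :=
      seedSet_nonneg v cr cc hin.1 hin.2.2.1
    have hcf1 : cfv (setVis v cr.toNat cc.toNat) + 1 = cfv v := cfv_set hvq
    have hchar0 : ∀ p : Int × Int, 0 ≤ p.1 → 0 ≤ p.2 →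
        (visP (setVis v cr.toNat cc.toNat) p = true ↔ visP v p = true ∨ p = (cr, cc)) :=
      fun p h1 h2 => visP_setVis v (cr, cc) p hin.1 hin.2.2.1 h1 h2
    have hv0cc : visP v0 (cr, cc) = false := by
      by_contra hb
      have := hm0 (cr, cc) hin.1 hin.2.2.1 (by simpa using hb)
      rw [this] at hvq; exact absurd hvq (by simp)
    obtain ⟨D, vf, he, hch, hr, hcl, hcand, hcf⟩ :=
      runBList board N num v0 r c f ih (bfsNbrs cr cc) (setVis v cr.toNat cc.toNat)
        (pvQuad b [(cr, cc)])
        (by omega)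
        (fun q hq => ⟨(cr, cc), hR, hq⟩)
        (by
          intro p h1 h2 hp
          exact (hchar0 p h1 h2).mpr (Or.inl (hm0 p h1 h2 hp)))
    refine ⟨D, vf, ?_, ?_, ?_, ?_, ?_⟩
    · show (bfsNbrs cr cc).foldl (dfsStep board num N (dfsGo board num N f))
          (seedSet v cr cc, (min cr b.1, max cr b.2.1, min cc b.2.2.1, max cc b.2.2.2)) = _
      rw [hseed]
      have hq1 : (min cr b.1, max cr b.2.1, min cc b.2.2.1, max cc b.2.2.2) =
          pvQuad b [(cr, cc)] := by simp [pvQuad]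
      rw [hq1, he]
      have : (cr, cc) :: D = [(cr, cc)] ++ D := rfl
      rw [this, pvQuad_append]
    · intro p h1 h2
      rw [hch p h1 h2, hchar0 p h1 h2]
      simp only [List.mem_cons]
      tauto
    · intro q hq
      rcases List.mem_cons.mp hq with h | h
      · subst h; exact ⟨hR, hin, hv0cc⟩
      · exact hr q h
    · intro q hq
      rcases List.mem_cons.mp hq with h | h
      · subst h
        intro t ht htin
        exact hcand t ht htin
      · exact hcl q h
    · simp only [List.length_cons] at *
      omega

-- ===== VERDICT (by name: the statement is the Claim_ definition above) =====
theorem bfs_spec : Claim_equal_bfs := by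
  intro board r c num visited _ _
  unfold Spec_bfs
  simp only [bfs, bfs_alt]
  set N : Int := (board.length : Int) with hN
  set v0 := seedSet visited r c with hv0def
  -- A's run
  obtain ⟨DA, vfA, heA, hchA, hrA, hjA⟩ :=
    runA board N num v0 r c (cfv v0 + 1) [(r, c)] v0 (r, r, c, c)
      (by simp only [List.length_cons, List.length_nil]; omega)
      (fun p _ _ h => h)
      (by
        intro p hp
        rw [List.mem_singleton] at hp
        subst hp
        exact Reach.seed)
      (by
        intro p hp
        rcases reach_cases hp with he | ⟨hin, hv0p⟩
        · exact Or.inl (by simp [he])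
        · exact Or.inr (Or.inr ⟨good0_ne_seed hin hv0p, hv0p⟩))
  -- B's run: unfold the seed call once, then the spec of the inner loop
  have hunf : dfsGo board num N (cfv visited + 2) r c (visited, (r, r, c, c)) =
      (bfsNbrs r c).foldl (dfsStep board num N (dfsGo board num N (cfv visited + 1)))
        (v0, (min r r, max r r, min c c, max c c)) := rfl
  rw [min_self, max_self, min_self, max_self] at hunf
  obtain ⟨DB, vfB, heB, hchB, hrB, hclB, hcandB, hcfB⟩ :=
    runBList board N num v0 r c (cfv visited + 1)
      (runB board N num v0 r c (cfv visited + 1))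
      (bfsNbrs r c) v0 (r, r, c, c)
      (by have := cfv_seedSet_le visited r c; rw [← hv0def] at this; omega)
      (fun q hq => ⟨(r, c), Reach.seed, hq⟩)
      (fun p _ _ h => h)
  -- completeness: every reachable cell is discovered, on both sides
  have hcompA : ∀ x, Reach board N num v0 r c x → x = (r, c) ∨ x ∈ DA := by
    intro x hx
    induction hx with
    | seed => exact Or.inl rfl
    | step hp hq hin hvx ihp =>
      right
      rename_i p x'
      have hvq : visP vfA x' = true := by
        rcases hjA p hp with hcl | ⟨hne, hunv⟩
        · exact hcl x' hq hin
        · rcases ihp with he | hm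
          · exact absurd he hne
          · rcases reach_cases hp with he | ⟨hinp, _⟩
            · exact absurd he hne
            · have := (hchA p hinp.1 hinp.2.2.1).mpr (Or.inr hm)
              rw [this] at hunv
              exact absurd hunv (by simp)
      rcases (hchA x' hin.1 hin.2.2.1).mp hvq with h | h
      · rw [hvx] at h; exact absurd h (by simp)
      · exact h
  have hcompB : ∀ x, Reach board N num v0 r c x → x = (r, c) ∨ x ∈ DB := by
    intro x hx
    induction hx with
    | seed => exact Or.inl rfl
    | step hp hq hin hvx ihp =>
      right
      rename_i p x'
      have hvq : visP vfB x' = true := by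
        rcases ihp with he | hm
        · exact hcandB x' (by rw [he] at hq; exact hq) hin
        · exact hclB p hm x' hq hin
      rcases (hchB x' hin.1 hin.2.2.1).mp hvq with h | h
      · rw [hvx] at h; exact absurd h (by simp)
      · exact h
  -- the two discovery lists agree as sets
  have hiff : ∀ x, x ∈ DA ↔ x ∈ DB := by
    intro x
    constructor
    · intro h
      obtain ⟨hx, hin, hv0x⟩ := hrA x h
      rcases hcompB x hx with he | hm
      · exact absurd he (good0_ne_seed hin hv0x)
      · exact hm
    · intro h
      obtain ⟨hx, hin, hv0x⟩ := hrB x h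
      rcases hcompA x hx with he | hm
      · exact absurd he (good0_ne_seed hin hv0x)
      · exact hm
  have hquad : pvQuad (r, r, c, c) DA = pvQuad (r, r, c, c) DB :=
    pvQuad_congr (r, r, c, c) DA DB hiff
  rw [heA, hunf, heB, hquad]
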